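-- pv_equiv track=rewrite | github.com/kilkkij/sublime-unique-status-name | unique_file_identifier.py | _unique_identifier_from_lists
-- ===== SOURCE A (Python) =====
-- def _unique_identifier_from_lists(path, paths, identifier):
--     """Shortest necessary list of directories identifying given path uniquely.
--     Arguments:
--     path        [str, str, ...]
--     paths       [[str, str, ...], [str, str, ...], ...]
--     identifier  [str, str, ...]
--     RETURN      [str, str, ...]
--     """
--     if not path or not paths:
--         return identifier
--     identifier.append(path[-1])
--     if in_same_branch(path, paths):
--         return identifier
--     paths = [p[:-1] for p in paths if p[-1]==path[-1]]
--     path = path[:-1]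
--     return _unique_identifier_from_lists(path, paths, identifier)
--
-- def in_same_branch(path, paths):
--     """True if the given path is a sub-path of all the others
--     path        list of strings
--     paths       lists of strings
--     """
--     return all((
--             len(path) < len(other_path)
--             and all(folder==other_folder for folder, other_folder in zip(path, other_path))
--         ) for other_path in paths)
-- ===== SOURCE B (Python) =====
-- def _unique_identifier_from_lists(path, paths, identifier):
--     """Flat loop over suffix length: recompute the surviving paths from the
--     original `paths` by suffix slicing instead of recursive filter-and-trim.
--     Mutates `identifier` in place like the original and returns it."""
--     n = len(path)
--     for k in range(1, n + 1):
--         tail = path[n - k + 1:]                      # last k-1 components of path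
--         survivors = [p for p in paths if p[len(p) - k + 1:] == tail]
--         if not survivors:
--             return identifier
--         identifier.append(path[n - k])
--         if all(len(p) > n and p[:n - k + 1] == path[:n - k + 1] for p in survivors):
--             return identifier
--     return identifier
-- ===== Notes on version B (the rewrite author's own statement) =====
-- stated objective: alternative
-- what changed: Replaces the tail recursion that repeatedly filters and rebuilds trimmed copies of the surviving paths with a single flat loop over the suffix length k that recomputes the survivors directly from the original paths by suffix slicing (no in_same_branch helper, no incremental trimming).
import Mathlib
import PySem

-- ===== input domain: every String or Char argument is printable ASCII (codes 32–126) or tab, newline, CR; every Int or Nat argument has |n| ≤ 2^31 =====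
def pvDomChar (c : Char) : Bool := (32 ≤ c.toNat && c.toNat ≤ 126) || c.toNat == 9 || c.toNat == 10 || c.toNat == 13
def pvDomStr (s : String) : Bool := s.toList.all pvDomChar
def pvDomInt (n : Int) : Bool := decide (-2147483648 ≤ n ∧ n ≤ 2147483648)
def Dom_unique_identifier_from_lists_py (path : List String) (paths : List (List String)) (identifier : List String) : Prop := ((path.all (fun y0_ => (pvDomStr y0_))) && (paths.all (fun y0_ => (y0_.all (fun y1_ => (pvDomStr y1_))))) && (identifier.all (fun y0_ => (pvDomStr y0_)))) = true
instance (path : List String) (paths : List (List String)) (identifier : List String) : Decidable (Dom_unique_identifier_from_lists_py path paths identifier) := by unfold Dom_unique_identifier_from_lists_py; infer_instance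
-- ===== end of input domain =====

-- B replaces A's filter-and-trim tail recursion by one flat loop over the suffix length
-- that recomputes the survivors from the original `paths` by suffix slicing (alternative
-- decomposition, similar cost).  Python note: both A and B mutate `identifier` in place
-- (append) and return it; the equivalence proved here is about the return value.

-- ===== PORT A =====
def in_same_branch_py (path : List String) (paths : List (List String)) : Bool :=
  paths.all (fun other =>
    decide (path.length < other.length) &&
    (path.zip other).all (fun fo => fo.1 == fo.2))

def unique_identifier_from_lists_py (path : List String) (paths : List (List String)) (identifier : List String) : List String :=
  if _h : path.isEmpty || paths.isEmpty then identifier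
  else
    -- path[-1]: exact, path is nonempty on this branch; p[-1] on an empty p would raise
    -- in Python — those inputs are excluded by Pre_ below.
    let identifier := identifier ++ [path.getLastD ""]
    if in_same_branch_py path paths then identifier
    else
      unique_identifier_from_lists_py path.dropLast
        ((paths.filter (fun p => p.getLastD "" == path.getLastD "")).map (fun p => p.dropLast))
        identifier
termination_by path.length
decreasing_by
  have hp : path ≠ [] := by
    intro h; subst h; simp at _h
  have hpos : 0 < path.length := List.length_pos_iff.mpr hp
  simp [List.length_dropLast]
  omega

-- ===== PORT B =====
-- loop of Source B: k runs 1..n; argument i counts the remaining iterations (k = n - i in the arm i+1)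
def altGo (path : List String) (paths : List (List String)) (n : Nat) (identifier : List String) : Nat → List String
  | 0 => identifier
  | i + 1 =>
    let k := n - i
    let tail := path.drop (n - (k - 1))                 -- path[n-k+1:]
    let survivors := paths.filter (fun p => p.drop (p.length - (k - 1)) == tail)   -- p[len(p)-k+1:] == tail
    if survivors.isEmpty then identifier
    else
      let identifier := identifier ++ [path.getD (n - k) ""]   -- identifier.append(path[n-k])
      if survivors.all (fun p => decide (n < p.length) && (p.take (n - k + 1) == path.take (n - k + 1))) then
        identifier
      else altGo path paths n identifier i

def unique_identifier_from_lists_py_alt (path : List String) (paths : List (List String)) (identifier : List String) : List String :=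
  altGo path paths path.length identifier path.length

-- ===== PRECONDITION & SPEC =====
-- Pre_ excludes exactly the inputs on which A raises IndexError: some p in paths is a
-- proper suffix of path, so after len(p) trimming steps p[-1] is taken of an empty list.
def Pre_unique_identifier_from_lists_py (path : List String) (paths : List (List String)) (identifier : List String) : Prop :=
  ∀ p ∈ paths, p <:+ path → p = path
instance (path : List String) (paths : List (List String)) (identifier : List String) : Decidable (Pre_unique_identifier_from_lists_py path paths identifier) := by unfold Pre_unique_identifier_from_lists_py; infer_instance

def pvWitness_unique_identifier_from_lists_py : List String × List (List String) × List String :=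
  (["a"], [["a"], ["b", "a"]], [])

def Spec_unique_identifier_from_lists_py (path : List String) (paths : List (List String)) (identifier : List String) (out : List String) : Prop := out = unique_identifier_from_lists_py_alt path paths identifier
instance (path : List String) (paths : List (List String)) (identifier : List String) (out : List String) : Decidable (Spec_unique_identifier_from_lists_py path paths identifier out) := by unfold Spec_unique_identifier_from_lists_py; infer_instance

-- ===== CLAIM (what is proved, stated in full; the proofs are below) =====
def Claim_equal_unique_identifier_from_lists_py : Prop := ∀ (path : List String) (paths : List (List String)) (identifier : List String), Dom_unique_identifier_from_lists_py path paths identifier → Pre_unique_identifier_from_lists_py path paths identifier → Spec_unique_identifier_from_lists_py path paths identifier (unique_identifier_from_lists_py path paths identifier)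


-- ===== LEMMAS AND PROOFS =====

theorem all_congr_mem {α : Type} (l : List α) (f g : α → Bool)
    (h : ∀ x ∈ l, f x = g x) : l.all f = l.all g := by
  induction l with
  | nil => rfl
  | cons a t ih =>
    simp only [List.all_cons, h a (by simp), ih (fun x hx => h x (by simp [hx]))]

theorem zip_all_eq (cur q : List String) (h : cur.length ≤ q.length) :
    ((cur.zip q).all fun fo => fo.1 == fo.2) = (q.take cur.length == cur) := by
  induction cur generalizing q with
  | nil => simp
  | cons a t ih =>
    cases q with
    | nil => simp at h
    | cons b u =>
      simp only [List.zip_cons_cons, List.all_cons, List.length_cons, List.take_succ_cons]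
      rw [ih u (by simpa using h)]
      simp only [List.cons_beq_cons]
      rw [Bool.and_comm]
      cases (List.take t.length u == t) <;> simp
        <;> exact ⟨fun h => h.symm, fun h => h.symm⟩

theorem take_getLastD (l : List String) (m : Nat) (h : m < l.length) :
    (l.take (m+1)).getLastD "" = l[m] := by
  rw [List.take_add_one, List.getElem?_eq_getElem h, Option.toList_some]
  exact List.getLastD_concat

theorem dropLast_take' (l : List String) (m : Nat) (h1 : 1 ≤ m) (h2 : m ≤ l.length) :
    (l.take m).dropLast = l.take (m-1) := by
  obtain ⟨m', rfl⟩ : ∃ m', m = m' + 1 := ⟨m - 1, by omega⟩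
  rw [List.take_add_one, List.getElem?_eq_getElem (by omega : m' < l.length), Option.toList_some]
  exact List.dropLast_concat

theorem isb_step (path : List String) (paths : List (List String)) (i : Nat)
    (h : i + 1 ≤ path.length) :
    in_same_branch_py (path.take (i+1))
      ((paths.filter (fun p => p.drop (p.length - (path.length - (i+1))) == path.drop (i+1))).map
        (fun p => p.take (p.length - (path.length - (i+1)))))
    = (paths.filter (fun p => p.drop (p.length - (path.length - (i+1))) == path.drop (i+1))).all
        (fun p => decide (path.length < p.length) && (p.take (i+1) == path.take (i+1))) := by
  unfold in_same_branch_py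
  rw [List.all_map]
  apply all_congr_mem
  intro p hp
  obtain ⟨-, hP⟩ := List.mem_filter.mp hp
  rw [beq_iff_eq] at hP
  have hlen : path.length - (i+1) ≤ p.length := by
    have := congrArg List.length hP
    simp only [List.length_drop] at this
    omega
  simp only [Function.comp]
  have hcl : (path.take (i+1)).length = i + 1 := by
    simp [List.length_take]; omega
  have hfl : (p.take (p.length - (path.length - (i+1)))).length
      = p.length - (path.length - (i+1)) := by
    simp [List.length_take]
  rw [hcl, hfl]
  by_cases hnp : path.length < p.length
  · have hlt : i + 1 < p.length - (path.length - (i+1)) := by omega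
    rw [zip_all_eq _ _ (by rw [hcl]; omega)]
    rw [hcl, List.take_take]
    have : min (i+1) (p.length - (path.length - (i+1))) = i + 1 := by omega
    rw [this, decide_eq_decide.mpr (by omega : (i + 1 < p.length - (path.length - (i+1))) ↔ (path.length < p.length))]
  · have h1 : decide (i + 1 < p.length - (path.length - (i+1))) = false := by
      simp; omega
    have h2 : decide (path.length < p.length) = false := by simp; omega
    rw [h1, h2, Bool.false_and, Bool.false_and]

theorem filter_step (path : List String) (paths : List (List String))
    (pre : ∀ p ∈ paths, p <:+ path → p = path) (i : Nat)
    (h : i + 1 ≤ path.length) (hi : i < path.length) :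
    (((paths.filter (fun p => p.drop (p.length - (path.length - (i+1))) == path.drop (i+1))).map
        (fun p => p.take (p.length - (path.length - (i+1))))).filter
          (fun q => q.getLastD "" == path[i])).map (fun q => q.dropLast)
    = (paths.filter (fun p => p.drop (p.length - (path.length - i)) == path.drop i)).map
        (fun p => p.take (p.length - (path.length - i))) := by
  rw [List.filter_map, List.map_map, List.filter_filter]
  have hfil : paths.filter (fun p =>
        ((fun q => q.getLastD "" == path[i]) ∘ fun p => p.take (p.length - (path.length - (i+1)))) p
        && (p.drop (p.length - (path.length - (i+1))) == path.drop (i+1)))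
      = paths.filter (fun p => p.drop (p.length - (path.length - i)) == path.drop i) := by
    apply List.filter_congr
    intro p hpm
    apply Bool.eq_iff_iff.mpr
    simp only [Function.comp, Bool.and_eq_true, beq_iff_eq]
    constructor
    · rintro ⟨h2, h1⟩
      have hlen1 : path.length - (i+1) ≤ p.length := by
        have := congrArg List.length h1
        simp only [List.length_drop] at this
        omega
      have hgt : path.length - (i+1) < p.length := by
        rcases Nat.lt_or_ge (path.length - (i+1)) p.length with hlt | hge
        · exact hlt
        · exfalso
          have hpe : p.length = path.length - (i+1) := by omega
          have hpsfx : p = path.drop (i+1) := by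
            have : p.drop (p.length - (path.length - (i+1))) = p := by
              rw [hpe]; simp
            rw [← this, h1]
          have := pre p hpm (hpsfx ▸ List.drop_suffix (i+1) path)
          have := congrArg List.length this
          rw [hpsfx] at this
          simp [List.length_drop] at this
          omega
      have hidx : p.length - (path.length - i) < p.length := by omega
      rw [List.drop_eq_getElem_cons hidx, List.drop_eq_getElem_cons (by omega : i < path.length)]
      have e : p.length - (path.length - i) + 1 = p.length - (path.length - (i+1)) := by omega
      rw [e, List.cons_eq_cons]
      refine ⟨?_, h1⟩
      have e2 : p.length - (path.length - (i+1)) = (p.length - (path.length - i)) + 1 := by omega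
      rw [e2, take_getLastD p _ (by omega)] at h2
      exact h2
    · intro h0
      have hlen0 : path.length - i ≤ p.length := by
        have := congrArg List.length h0
        simp only [List.length_drop] at this
        omega
      have hidx : p.length - (path.length - i) < p.length := by omega
      rw [List.drop_eq_getElem_cons hidx, List.drop_eq_getElem_cons (by omega : i < path.length),
        List.cons_eq_cons] at h0
      obtain ⟨hhead, htail⟩ := h0
      have e : p.length - (path.length - i) + 1 = p.length - (path.length - (i+1)) := by omega
      rw [e] at htail
      refine ⟨?_, htail⟩
      have e2 : p.length - (path.length - (i+1)) = (p.length - (path.length - i)) + 1 := by omega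
      rw [e2, take_getLastD p _ (by omega)]
      exact hhead
  rw [hfil]
  apply List.map_congr_left
  intro p hp
  obtain ⟨-, hP⟩ := List.mem_filter.mp hp
  rw [beq_iff_eq] at hP
  have hlen0 : path.length - i ≤ p.length := by
    have := congrArg List.length hP
    simp only [List.length_drop] at this
    omega
  simp only [Function.comp]
  rw [dropLast_take' p _ (by omega) (by omega)]
  congr 1
  omega

theorem key (path : List String) (paths : List (List String))
    (pre : ∀ p ∈ paths, p <:+ path → p = path) :
    ∀ i, i ≤ path.length → ∀ id,
      unique_identifier_from_lists_py (path.take i)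
        ((paths.filter (fun p => p.drop (p.length - (path.length - i)) == path.drop i)).map
          (fun p => p.take (p.length - (path.length - i)))) id
      = altGo path paths path.length id i := by
  intro i
  induction i with
  | zero =>
    intro _ id
    rw [unique_identifier_from_lists_py]
    simp [altGo]
  | succ i IH =>
    intro h id
    have hi : i < path.length := by omega
    -- arithmetic normalisation of the altGo body
    have e1 : path.length - (path.length - i - 1) = i + 1 := by omega
    have e2 : path.length - i - 1 = path.length - (i + 1) := by omega
    have e3 : path.length - (path.length - i) = i := by omega
    simp only [altGo]
    rw [e1, e2, e3]
    by_cases hS : paths.filter (fun p => p.drop (p.length - (path.length - (i+1))) == path.drop (i+1)) = []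
    · rw [hS]
      rw [unique_identifier_from_lists_py]
      simp
    · have hguard : ¬(((path.take (i+1)).isEmpty
          || ((paths.filter (fun p => p.drop (p.length - (path.length - (i+1))) == path.drop (i+1))).map
              (fun p => p.take (p.length - (path.length - (i+1))))).isEmpty) = true) := by
        simp only [Bool.or_eq_true, List.isEmpty_iff, List.map_eq_nil_iff]
        rintro (h1 | h2)
        · rcases List.take_eq_nil_iff.mp h1 with h1 | h1
          · omega
          · subst h1; simp at h
        · exact hS h2
      rw [unique_identifier_from_lists_py, dif_neg hguard]
      rw [isb_step path paths i h]
      rw [take_getLastD path i hi]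
      have hEmpF : ((paths.filter (fun p => p.drop (p.length - (path.length - (i+1))) == path.drop (i+1))).isEmpty) = false := by
        simp only [List.isEmpty_eq_false_iff]
        exact hS
      rw [hEmpF]
      rw [List.getD_eq_getElem path "" hi]
      cases hall : (paths.filter (fun p => p.drop (p.length - (path.length - (i+1))) == path.drop (i+1))).all
          (fun p => decide (path.length < p.length) && (p.take (i+1) == path.take (i+1))) with
      | true => simp
      | false =>
        simp only [Bool.false_eq_true, if_false]
        rw [dropLast_take' path (i+1) (by omega) h]
        simp only [Nat.add_sub_cancel]
        rw [filter_step path paths pre i h hi]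
        exact IH (by omega) (id ++ [path[i]])

-- ===== VERDICT (by name: the statement is the Claim_ definition above) =====
theorem unique_identifier_from_lists_py_spec : Claim_equal_unique_identifier_from_lists_py := by
  intro path paths identifier _ pre
  unfold Spec_unique_identifier_from_lists_py unique_identifier_from_lists_py_alt
  have h := key path paths pre path.length le_rfl identifier
  simpa using h
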